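-- pv_equiv track=rewrite | github.com/aws-samples/natural-language-queries-for-datalakes | src/config.py | snake_to_acronym
-- ===== SOURCE A (Python) =====
-- def snake_to_acronym(snake_str: str) -> str:
--     # Handle empty string case
--     if not snake_str:
--         return ""
--     # Get first letter of the string
--     result = [snake_str[0].upper()]
--     # Find all characters that come after underscores
--     for i in range(1, len(snake_str)):
--         if snake_str[i-1] == '_' and snake_str[i].isalpha():
--             result.append(snake_str[i].upper())
--     return ''.join(result)
-- ===== SOURCE B (Python) =====
-- def snake_to_acronym(snake_str: str) -> str:
--     # Handle empty string case
--     if not snake_str: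
--         return ""
--     parts = snake_str.split('_')
--     # First character is always taken, whatever it is
--     result = [snake_str[0].upper()]
--     # Each later token starts right after an underscore
--     for part in parts[1:]:
--         if part and part[0].isalpha():
--             result.append(part[0].upper())
--     return ''.join(result)
-- ===== Notes on version B (the rewrite author's own statement) =====
-- stated objective: idiomatic
-- what changed: Replaces the char-by-char index scan that tests whether the previous character is an underscore with a split-on-underscore token decomposition: seed with the uppercased first character, then take the first character of each later token when it is alphabetic.
import Mathlib
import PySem

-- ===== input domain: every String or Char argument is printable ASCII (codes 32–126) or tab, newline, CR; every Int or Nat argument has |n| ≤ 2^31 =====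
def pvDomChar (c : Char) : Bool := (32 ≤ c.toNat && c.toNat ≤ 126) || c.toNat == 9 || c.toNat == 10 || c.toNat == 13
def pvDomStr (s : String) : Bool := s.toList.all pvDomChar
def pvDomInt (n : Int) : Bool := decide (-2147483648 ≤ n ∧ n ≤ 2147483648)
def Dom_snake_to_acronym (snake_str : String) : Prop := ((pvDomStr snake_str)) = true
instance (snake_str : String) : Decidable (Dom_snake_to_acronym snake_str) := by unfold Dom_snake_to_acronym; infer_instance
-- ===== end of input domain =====

-- B replaces A's char-by-char prev-underscore index scan with a split('_') token decomposition (idiomatic, same cost).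


-- ===== PORT A =====
-- the for-loop over i in range(1, len): walks (prev, current) pairs, appending upper(current) when prev == '_' and current.isalpha()
def snakeLoopA : Char → List Char → List Char
  | _, [] => []
  | prev, c :: cs =>
    (if prev == '_' && PySem.Chars.isalpha c then [PySem.Chars.upperChar c] else []) ++ snakeLoopA c cs

def snake_to_acronym (snake_str : String) : String :=
  match snake_str.toList with
  | [] => ""
  | c :: rest => String.mk (PySem.Chars.upperChar c :: snakeLoopA c rest)

-- ===== PORT B =====
def snake_to_acronym_alt (snake_str : String) : String :=
  match snake_str.toList with
  | [] => ""
  | c :: rest =>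
    let parts := PySem.Chars.splitOn (c :: rest) ['_']
    String.mk ((parts.drop 1).foldl
      (fun acc part =>
        match part with
        | [] => acc
        | p :: _ => if PySem.Chars.isalpha p then acc ++ [PySem.Chars.upperChar p] else acc)
      [PySem.Chars.upperChar c])

-- ===== PRECONDITION & SPEC =====
def Spec_snake_to_acronym (snake_str : String) (out : String) : Prop := out = snake_to_acronym_alt snake_str
instance (snake_str : String) (out : String) : Decidable (Spec_snake_to_acronym snake_str out) := by unfold Spec_snake_to_acronym; infer_instance

-- ===== CLAIM (what is proved, stated in full; the proofs are below) =====
def Claim_equal_snake_to_acronym : Prop := ∀ (snake_str : String), Dom_snake_to_acronym snake_str → Spec_snake_to_acronym snake_str (snake_to_acronym snake_str)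

-- ===== LEMMAS AND PROOFS =====

-- contribution of one token of the split: its first character, uppercased, if alphabetic
def tokContrib : List Char → List Char
  | [] => []
  | p :: _ => if PySem.Chars.isalpha p then [PySem.Chars.upperChar p] else []

-- simple structural recursion computing split-on-'_'
def split1 : List Char → List (List Char)
  | [] => [[]]
  | c :: cs => if c = '_' then [] :: split1 cs else (split1 cs).modifyHead (c :: ·)

theorem split1_ne_nil (l : List Char) : split1 l ≠ [] := by
  induction l with
  | nil => simp [split1]
  | cons c cs ih =>
    simp only [split1]
    split_ifs
    · simp
    · cases h : split1 cs with
      | nil => exact absurd h ih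
      | cons t ts => simp [List.modifyHead]

theorem splitOn_go_eq (fuel : Nat) :
    ∀ (l cur : List Char) (acc : List (List Char)), l.length ≤ fuel →
      PySem.Chars.splitOn.go ['_'] fuel l cur acc
        = acc.reverse ++ (split1 l).modifyHead (cur.reverse ++ ·) := by
  induction fuel with
  | zero =>
    intro l cur acc h
    have : l = [] := by cases l <;> simp_all
    subst this
    simp [PySem.Chars.splitOn.go, split1, List.modifyHead]
  | succ n ih =>
    intro l cur acc h
    cases l with
    | nil => simp [PySem.Chars.splitOn.go, split1, List.modifyHead]
    | cons c rest =>
      by_cases hc : c = '_'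
      · subst hc
        rw [show PySem.Chars.splitOn.go ['_'] (n+1) ('_' :: rest) cur acc
              = PySem.Chars.splitOn.go ['_'] n rest [] (cur.reverse :: acc) by
            simp [PySem.Chars.splitOn.go, List.isPrefixOf]]
        rw [ih rest [] (cur.reverse :: acc) (by simpa using Nat.le_of_succ_le_succ h)]
        obtain ⟨t, ts, hts⟩ : ∃ t ts, split1 rest = t :: ts := by
          cases hsp : split1 rest with
          | nil => exact absurd hsp (split1_ne_nil rest)
          | cons t ts => exact ⟨t, ts, rfl⟩
        simp [split1, hts, List.modifyHead]
      · rw [show PySem.Chars.splitOn.go ['_'] (n+1) (c :: rest) cur acc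
              = PySem.Chars.splitOn.go ['_'] n rest (c :: cur) acc by
            simp only [PySem.Chars.splitOn.go, List.isPrefixOf]
            split_ifs with hpre
            · exact absurd (by have h2 := hpre.symm; simp only [Bool.and_true] at h2; exact (beq_iff_eq.mp h2.symm).symm) hc
            · rfl]
        rw [ih rest (c :: cur) acc (by simpa using Nat.le_of_succ_le_succ h)]
        obtain ⟨t, ts, hts⟩ : ∃ t ts, split1 rest = t :: ts := by
          cases hsp : split1 rest with
          | nil => exact absurd hsp (split1_ne_nil rest)
          | cons t ts => exact ⟨t, ts, rfl⟩
        simp [split1, hc, hts, List.modifyHead]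

theorem splitOn_eq_split1 (l : List Char) :
    PySem.Chars.splitOn l ['_'] = split1 l := by
  have h := splitOn_go_eq (l.length + 1) l [] [] (by omega)
  unfold PySem.Chars.splitOn
  rw [h]
  cases hs : split1 l <;> simp [List.modifyHead]

theorem foldl_tokContrib (toks : List (List Char)) :
    ∀ (init : List Char),
      toks.foldl
        (fun acc part =>
          match part with
          | [] => acc
          | p :: _ => if PySem.Chars.isalpha p then acc ++ [PySem.Chars.upperChar p] else acc)
        init = init ++ toks.flatMap tokContrib := by
  induction toks with
  | nil => intro init; simp
  | cons t ts ih =>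
    intro init
    cases t with
    | nil => simp [List.foldl, ih, tokContrib]
    | cons p ps =>
      simp only [List.foldl, List.flatMap_cons, tokContrib]
      split_ifs with hp <;> simp [ih]

theorem snakeLoopA_eq (cs : List Char) :
    ∀ (prev : Char),
      snakeLoopA prev cs
        = (if prev = '_' then tokContrib ((split1 cs).headD []) else [])
            ++ ((split1 cs).tail).flatMap tokContrib := by
  induction cs with
  | nil => intro prev; simp [snakeLoopA, split1, tokContrib]
  | cons c rest ih =>
    intro prev
    obtain ⟨t, ts, hts⟩ : ∃ t ts, split1 rest = t :: ts := by
      cases hsp : split1 rest with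
      | nil => exact absurd hsp (split1_ne_nil rest)
      | cons t ts => exact ⟨t, ts, rfl⟩
    by_cases hc : c = '_'
    · subst hc
      have ha : PySem.Chars.isalpha '_' = false := by decide
      simp [snakeLoopA, split1, ih, hts, ha, tokContrib]
    · simp only [snakeLoopA, split1, if_neg hc, ih, hts, List.modifyHead]
      by_cases hp : prev = '_'
      · simp [hp, tokContrib]
      · have : (prev == '_') = false := by simp [hp]
        simp [this, hp]

theorem snake_to_acronym_eq_alt (s : String) :
    snake_to_acronym s = snake_to_acronym_alt s := by
  unfold snake_to_acronym snake_to_acronym_alt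
  cases hl : s.toList with
  | nil => rfl
  | cons c rest =>
    simp only [splitOn_eq_split1, foldl_tokContrib, snakeLoopA_eq]
    obtain ⟨t, ts, hts⟩ : ∃ t ts, split1 rest = t :: ts := by
      cases hsp : split1 rest with
      | nil => exact absurd hsp (split1_ne_nil rest)
      | cons t ts => exact ⟨t, ts, rfl⟩
    by_cases hc : c = '_'
    · subst hc
      simp [split1, hts]
    · simp [split1, hc, hts, List.modifyHead]

-- ===== VERDICT (by name: the statement is the Claim_ definition above) =====
theorem snake_to_acronym_spec : Claim_equal_snake_to_acronym := by
  intro s _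
  unfold Spec_snake_to_acronym
  exact snake_to_acronym_eq_alt s
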